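-- pv_equiv track=rewrite | github.com/austin-mroz/SPLASHD | src/splashd/construct.py | _sorted_k_partitions
-- ===== SOURCE A (Python) =====
-- def _sorted_k_partitions(seq, k):
--     """Returns a list of all unique k-partitions of `seq`.
--
--     Each partition is a list of parts, and each part is a tuple.
--
--     The parts in each individual partition will be sorted in shortlex
--     order (i.e., by length first, then lexicographically).
--
--     The overall list of partitions will then be sorted by the length
--     of their first part, the length of their second part, ...,
--     the length of their last part, and then lexicographically.
--     """
--     n = len(seq)
--     groups = []  # a list of lists, currently empty
--
--     def generate_partitions(i):
--         if i >= n: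
--             yield list(map(tuple, groups))
--         else:
--             if n - i > k - len(groups):
--                 for group in groups:
--                     group.append(seq[i])
--                     yield from generate_partitions(i + 1)
--                     group.pop()
--
--             if len(groups) < k:
--                 groups.append([seq[i]])
--                 yield from generate_partitions(i + 1)
--                 groups.pop()
--
--     result = generate_partitions(0)
--
--     # Sort the parts in each partition in shortlex order
--     result = [sorted(ps, key=lambda p: (len(p), p)) for ps in result]
--     # Sort partitions by the length of each part, then lexicographically.
--     result = sorted(result, key=lambda ps: (*map(len, ps), ps))
--
--     return result
-- ===== SOURCE B (Python) =====
-- def _sorted_k_partitions(seq, k):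
--     """Iterative breadth-first version: fold over seq keeping a frontier of
--     immutable partial partitions instead of a recursive backtracking
--     generator over one shared mutable `groups` list."""
--     n = len(seq)
--     states = [[]]
--     for i, x in enumerate(seq):
--         new_states = []
--         for G in states:
--             if n - i > k - len(G):
--                 for j in range(len(G)):
--                     new_states.append(G[:j] + [G[j] + (x,)] + G[j + 1:])
--             if len(G) < k:
--                 new_states.append(G + [(x,)])
--         states = new_states
--     # Sort the parts in each partition in shortlex order
--     result = [sorted(ps, key=lambda p: (len(p), p)) for ps in states]
--     # Sort partitions by the length of each part, then lexicographically.
--     result = sorted(result, key=lambda ps: (*map(len, ps), ps))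
--     return result
-- ===== Notes on version B (the rewrite author's own statement) =====
-- stated objective: alternative
-- what changed: Replaces A's recursive backtracking generator that mutates one shared `groups` list (append/recurse/pop) with an iterative breadth-first fold over the sequence that keeps a frontier of immutable partial partitions, then applies the same two-step sort.
import Mathlib
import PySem

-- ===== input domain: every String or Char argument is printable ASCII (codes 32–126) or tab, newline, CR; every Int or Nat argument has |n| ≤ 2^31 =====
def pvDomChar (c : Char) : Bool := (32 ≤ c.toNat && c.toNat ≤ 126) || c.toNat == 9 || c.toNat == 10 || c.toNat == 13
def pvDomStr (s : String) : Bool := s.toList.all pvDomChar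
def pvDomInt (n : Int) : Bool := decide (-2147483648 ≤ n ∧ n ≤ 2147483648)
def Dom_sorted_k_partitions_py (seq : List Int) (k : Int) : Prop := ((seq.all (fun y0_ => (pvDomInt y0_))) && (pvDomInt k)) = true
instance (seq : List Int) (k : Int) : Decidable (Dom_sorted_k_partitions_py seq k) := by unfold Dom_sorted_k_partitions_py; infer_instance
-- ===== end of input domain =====

-- B replaces A's recursive backtracking generator over one shared mutable `groups`
-- by an iterative breadth-first frontier of immutable partial partitions (objective: alternative).

-- ===== PORT A =====
-- A's inner generator `generate_partitions(i)`; `groups` is the explicit state.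
-- `group.append(…)/pop()` on the j-th group becomes `groups.set j …`; parts are lists.
def pyGenParts (seq : List Int) (k : Int) (i : Nat) (groups : List (List Int)) :
    List (List (List Int)) :=
  if i ≥ seq.length then
    [groups]
  else
    (if (seq.length : Int) - i > k - groups.length then
      (List.range groups.length).flatMap (fun j =>
        pyGenParts seq k (i + 1) (groups.set j (groups.getD j [] ++ [seq.getD i 0])))
     else []) ++
    (if (groups.length : Int) < k then
      pyGenParts seq k (i + 1) (groups ++ [[seq.getD i 0]])
     else [])
termination_by seq.length - i
decreasing_by all_goals omega

def sorted_k_partitions_py (seq : List Int) (k : Int) : List (List (List Int)) :=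
  let result := pyGenParts seq k 0 []
  -- sorted(ps, key=lambda p: (len(p), p)) — shortlex inside each partition
  let result := result.map (fun ps => PySem.List.sorted2 ps (fun p => p.length) (fun p => p))
  -- sorted(result, key=lambda ps: (*map(len, ps), ps)); all partitions of one result
  -- have the same number of parts, so the starred tuple compares exactly as the
  -- pair (list of lengths, partition), both lexicographically.
  PySem.List.sorted2 result (fun ps => ps.map (·.length)) (fun ps => ps)

-- ===== PORT B =====
-- one step of B's inner loop body: the successors of one partial partition G at element x
def altExpand (k : Int) (rem : Int) (G : List (List Int)) (x : Int) :
    List (List (List Int)) :=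
  (if rem > k - G.length then
    (List.range G.length).map (fun j => G.take j ++ [G.getD j [] ++ [x]] ++ G.drop (j + 1))
   else []) ++
  (if (G.length : Int) < k then [G ++ [[x]]] else [])

def sorted_k_partitions_py_alt (seq : List Int) (k : Int) : List (List (List Int)) :=
  let n := seq.length
  let states := (PySem.List.enumerate seq).foldl
    (fun states p => states.foldl (fun acc G => acc ++ altExpand k ((n : Int) - p.1) G p.2) [])
    [[]]
  let result := states.map (fun ps => PySem.List.sorted2 ps (fun p => p.length) (fun p => p))
  PySem.List.sorted2 result (fun ps => ps.map (·.length)) (fun ps => ps)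

-- ===== PRECONDITION & SPEC =====
def Spec_sorted_k_partitions_py (seq : List Int) (k : Int) (out : List (List (List Int))) : Prop := out = sorted_k_partitions_py_alt seq k
instance (seq : List Int) (k : Int) (out : List (List (List Int))) : Decidable (Spec_sorted_k_partitions_py seq k out) := by unfold Spec_sorted_k_partitions_py; infer_instance

-- ===== CLAIM (what is proved, stated in full; the proofs are below) =====
def Claim_equal_sorted_k_partitions_py : Prop := ∀ (seq : List Int) (k : Int), Dom_sorted_k_partitions_py seq k → Spec_sorted_k_partitions_py seq k (sorted_k_partitions_py seq k)

-- ===== LEMMAS AND PROOFS =====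

-- A's one unfolding step, for i < n, is exactly B's successor list followed by recursion.
theorem pyGenParts_step (seq : List Int) (k : Int) (i : Nat) (G : List (List Int))
    (h : i < seq.length) :
    pyGenParts seq k i G =
      (altExpand k ((seq.length : Int) - i) G (seq.getD i 0)).flatMap
        (pyGenParts seq k (i + 1)) := by
  rw [pyGenParts]
  simp only [altExpand, if_neg (by omega : ¬ i ≥ seq.length)]
  rw [List.flatMap_append]
  congr 1
  · by_cases hc : (seq.length : Int) - i > k - G.length
    · rw [if_pos hc, if_pos hc, List.flatMap_map]
      apply List.flatMap_congr
      intro j hj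
      have hjlt : j < G.length := List.mem_range.mp hj
      congr 1
      rw [List.set_eq_take_append_cons_drop, if_pos hjlt]
      simp
    · rw [if_neg hc, if_neg hc]; simp
  · by_cases hc : (G.length : Int) < k
    · rw [if_pos hc, if_pos hc]; simp
    · rw [if_neg hc, if_neg hc]; simp

-- Main invariant: flat-mapping A's generator from position i over a frontier L equals
-- B's breadth-first fold over the remaining enumerated elements.
theorem genA_eq_bfs (seq : List Int) (k : Int) :
    ∀ (rest : List Int) (s : Nat), seq.drop s = rest →
      ∀ (L : List (List (List Int))),
        L.flatMap (pyGenParts seq k s) =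
          (PySem.List.enumerate rest s).foldl
            (fun states p =>
              states.foldl (fun acc G => acc ++ altExpand k ((seq.length : Int) - p.1) G p.2) [])
            L := by
  intro rest
  induction rest with
  | nil =>
    intro s hs L
    have hge : s ≥ seq.length := by
      have := congrArg List.length hs
      simp at this
      omega
    have hone : ∀ G, pyGenParts seq k s G = [G] := by
      intro G; rw [pyGenParts, if_pos hge]
    simp only [PySem.List.enumerate_nil, List.foldl_nil]
    exact (List.flatMap_congr (fun G _ => hone G)).trans (List.flatMap_singleton' L)
  | cons x rest' ih =>
    intro s hs L
    have hlt : s < seq.length := by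
      have := congrArg List.length hs
      simp at this
      omega
    have hcd := List.getElem_cons_drop hlt
    rw [hs] at hcd
    have hx : seq.getD s 0 = x := by
      have h1 : seq[s] = x := by
        injection hcd.symm with h1 _
        exact h1.symm
      simp [List.getD_eq_getElem?_getD, List.getElem?_eq_getElem hlt, h1]
    have hdrop : seq.drop (s + 1) = rest' := by
      injection hcd.symm with _ h2
      exact h2.symm
    rw [PySem.List.enumerate_cons, List.foldl_cons]
    have ih' := ih (s + 1) hdrop
      (L.foldl (fun acc G => acc ++ altExpand k ((seq.length : Int) - s) G x) [])
    push_cast at ih' ⊢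
    rw [← ih']
    have hfront :
        L.foldl (fun acc G => acc ++ altExpand k ((seq.length : Int) - s) G x) [] =
          L.flatMap (fun G => altExpand k ((seq.length : Int) - s) G x) := by
      simpa using PySem.List.foldl_append_eq_flatMap
        (l := L) (g := fun G => altExpand k ((seq.length : Int) - s) G x) (acc := [])
    rw [hfront, List.flatMap_assoc]
    apply List.flatMap_congr
    intro G _
    rw [pyGenParts_step seq k s G hlt, hx]

-- ===== VERDICT (by name: the statement is the Claim_ definition above) =====
theorem sorted_k_partitions_py_spec : Claim_equal_sorted_k_partitions_py := by
  intro seq k _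
  unfold Spec_sorted_k_partitions_py
  unfold sorted_k_partitions_py sorted_k_partitions_py_alt
  have h := genA_eq_bfs seq k seq 0 (by simp) [[]]
  simp only [List.flatMap_cons, List.flatMap_nil, List.append_nil, Nat.cast_zero] at h
  rw [h]
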